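-- pv_equiv track=rewrite | github.com/ricardombrodriguez/MostFrequentLetters | main.py | space_saving_count
-- ===== SOURCE A (Python) =====
-- def space_saving_count(text, k):
--
--     counter = {}
--
--     for char in text:
--         # Update letter count
--         if char in counter:
--             counter[char] += 1
--         else:
--             if len(counter) >= k:
--                 # Get the smallest count of the counter and replace it if the new character has a bigger count
--                 smallest_char = min(counter, key=counter.get)
--                 smallest_value = counter[smallest_char]
--                 del counter[smallest_char]
--                 counter[char] = smallest_value + 1
--             else:
--                 # Push if the counter is not full yet
--                 counter[char] = 1
--
--     return counter
-- ===== SOURCE B (Python) =====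
-- def _insort(entries, item):
--     # insert item into entries, kept ascending by the (count, seq) key
--     i = 0
--     while i < len(entries) and entries[i][0] < item[0]:
--         i += 1
--     entries.insert(i, item)
--
--
-- def space_saving_count(text, k):
--     # Space-Saving kept in a sorted index: entries is the list of
--     # ((count, seq), char) kept ascending by (count, seq), where seq is the
--     # time the char was (re)admitted; the eviction victim is entries[0],
--     # so no scan for the minimum is needed. index maps char -> (count, seq)
--     # in admission order, which is exactly the output dict's order.
--     entries = []
--     index = {}
--     seq = 0
--     for char in text:
--         if char in index:
--             cnt, s = index[char]
--             entries = [e for e in entries if e[0] != (cnt, s)]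
--             _insort(entries, ((cnt + 1, s), char))
--             index[char] = (cnt + 1, s)
--         elif len(index) < k:
--             _insort(entries, ((1, seq), char))
--             index[char] = (1, seq)
--             seq += 1
--         else:
--             (cnt, s), old = entries[0]
--             entries = entries[1:]
--             del index[old]
--             _insort(entries, ((cnt + 1, seq), char))
--             index[char] = (cnt + 1, seq)
--             seq += 1
--     return {c: cs[0] for c, cs in index.items()}
-- ===== Notes on version B (the rewrite author's own statement) =====
-- stated objective: alternative
-- what changed: B keeps the Space-Saving summary as a list of ((count, seq), char) entries maintained in ascending (count, admission-time) order by insertion-sort updates, so the eviction victim is always the head of the list and A's per-eviction min() scan over the whole dict disappears; a char->(count, seq) dict in admission order yields the identical output dict.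
import Mathlib
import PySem

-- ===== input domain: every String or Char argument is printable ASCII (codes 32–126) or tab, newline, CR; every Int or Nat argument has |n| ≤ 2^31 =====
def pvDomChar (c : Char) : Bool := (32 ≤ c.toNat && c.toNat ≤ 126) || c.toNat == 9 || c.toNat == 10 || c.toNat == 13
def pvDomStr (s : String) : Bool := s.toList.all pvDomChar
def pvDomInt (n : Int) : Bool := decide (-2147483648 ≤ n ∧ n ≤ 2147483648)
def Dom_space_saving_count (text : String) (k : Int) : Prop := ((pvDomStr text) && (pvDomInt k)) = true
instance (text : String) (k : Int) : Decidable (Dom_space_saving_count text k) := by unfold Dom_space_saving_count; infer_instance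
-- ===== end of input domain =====

-- B replaces A's per-eviction minimum scan over the dict by a list of ((count, seq), char)
-- entries kept sorted ascending by (count, seq), so the eviction victim is always the head;
-- same return value (an 'alternative' restructuring, no speed claim).

-- ===== PORT A =====
def aStep (k : Int) (d : PySem.Dict String Int) (c : Char) : PySem.Dict String Int :=
  let ch := String.ofList [c]
  match d.get? ch with
  | some v => d.insert ch (v + 1)                  -- counter[char] += 1
  | none =>
    if k ≤ (d.size : Int) then                     -- len(counter) >= k
      match PySem.List.min? d.keys (fun x => d.getD x 0) with   -- min(counter, key=counter.get)
      | some sc => (d.erase sc).insert ch (d.getD sc 0 + 1)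
      | none => d.insert ch 1                      -- unreachable: Python raises ValueError here (excluded by Pre_)
    else d.insert ch 1

def space_saving_count (text : String) (k : Int) : List (String × Int) :=
  (text.toList.foldl (aStep k) PySem.Dict.empty).items

-- ===== PORT B =====
-- _insort: insert into the list kept ascending by the (count, seq) key (tuple '<' is lexicographic)
def pvLexLt (a b : Int × Int) : Bool := a.1 < b.1 || (a.1 == b.1 && a.2 < b.2)

def pvInsort (x : (Int × Int) × String) : List ((Int × Int) × String) → List ((Int × Int) × String)
  | [] => [x]
  | y :: ys => if pvLexLt y.1 x.1 then y :: pvInsort x ys else x :: y :: ys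

def bStep (k : Int) (st : List ((Int × Int) × String) × PySem.Dict String (Int × Int) × Int) (c : Char) :
    List ((Int × Int) × String) × PySem.Dict String (Int × Int) × Int :=
  let ch := String.ofList [c]
  let (entries, index, seq) := st
  match index.get? ch with
  | some (cnt, s) =>
      (pvInsort ((cnt + 1, s), ch) (entries.filter (fun e => e.1 != (cnt, s))),
       index.insert ch (cnt + 1, s), seq)
  | none =>
    if (index.size : Int) < k then
      (pvInsort ((1, seq), ch) entries, index.insert ch (1, seq), seq + 1)
    else
      match entries with
      | [] => (entries, index, seq)                -- unreachable: Python raises IndexError here (excluded by Pre_)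
      | e :: rest =>                                -- (cnt, s), old = entries[0]; entries = entries[1:]
          (pvInsort ((e.1.1 + 1, seq), ch) rest,
           (index.erase e.2).insert ch (e.1.1 + 1, seq), seq + 1)

def space_saving_count_alt (text : String) (k : Int) : List (String × Int) :=
  let st := text.toList.foldl (bStep k) ([], PySem.Dict.empty, 0)
  st.2.1.items.map (fun p => (p.1, p.2.1))

-- ===== PRECONDITION & SPEC =====
-- Pre_ excludes only k < 1 with a non-empty text: there A's first unseen character evicts from an
-- EMPTY counter and min({}) raises ValueError (B's entries[0] raises IndexError too).
def Pre_space_saving_count (text : String) (k : Int) : Prop := text = "" ∨ 1 ≤ k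
instance (text : String) (k : Int) : Decidable (Pre_space_saving_count text k) := by
  unfold Pre_space_saving_count; infer_instance

def pvWitness_space_saving_count : String × Int := ("abracadabra", 3)

def Spec_space_saving_count (text : String) (k : Int) (out : List (String × Int)) : Prop :=
  out = space_saving_count_alt text k
instance (text : String) (k : Int) (out : List (String × Int)) : Decidable (Spec_space_saving_count text k out) := by
  unfold Spec_space_saving_count; infer_instance

-- ===== CLAIM (what is proved, stated in full; the proofs are below) =====
def Claim_equal_space_saving_count : Prop := ∀ (text : String) (k : Int),
  Dom_space_saving_count text k → Pre_space_saving_count text k →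
  Spec_space_saving_count text k (space_saving_count text k)

-- ===== LEMMAS AND PROOFS =====

-- the (count, seq) key of an entry, and the two projections of an index item
def pvKeyLtP (a b : (Int × Int) × String) : Prop := pvLexLt a.1 b.1 = true

-- the coupling invariant between A's counter d and B's state (entries, index, seq)
def pvInv (d : PySem.Dict String Int)
    (st : List ((Int × Int) × String) × PySem.Dict String (Int × Int) × Int) : Prop :=
  d.items = st.2.1.items.map (fun p => (p.1, p.2.1)) ∧
  st.1.Perm (st.2.1.items.map (fun p => (p.2, p.1))) ∧
  st.1.Pairwise pvKeyLtP ∧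
  (st.2.1.items.map (fun p => p.2.2)).Pairwise (· < ·) ∧
  (∀ p ∈ st.2.1.items, p.2.2 < st.2.2) ∧
  (st.2.1.items.map (·.1)).Nodup

theorem pvInsort_perm (x : (Int × Int) × String) (l : List ((Int × Int) × String)) :
    (pvInsort x l).Perm (x :: l) := by
  induction l with
  | nil => simp [pvInsort]
  | cons y ys ih =>
    simp only [pvInsort]
    split
    · exact ((ih.cons y).trans (List.Perm.swap x y ys))
    · exact List.Perm.refl _

theorem pvLexLt_trans {a b c : Int × Int} (h1 : pvLexLt a b = true) (h2 : pvLexLt b c = true) :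
    pvLexLt a c = true := by
  simp only [pvLexLt, Bool.or_eq_true, Bool.and_eq_true, decide_eq_true_eq, beq_iff_eq] at *
  omega

theorem pvLexLt_total {a b : Int × Int} (h : a ≠ b) : pvLexLt a b = true ∨ pvLexLt b a = true := by
  simp only [pvLexLt, Bool.or_eq_true, Bool.and_eq_true, decide_eq_true_eq, beq_iff_eq]
  rcases a with ⟨a1, a2⟩; rcases b with ⟨b1, b2⟩
  simp only []
  by_cases h1 : a1 = b1
  · subst h1
    have h2 : a2 ≠ b2 := fun he => h (by rw [he])
    omega
  · omega

theorem pvInsort_sorted (x : (Int × Int) × String) (l : List ((Int × Int) × String))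
    (hs : l.Pairwise pvKeyLtP) (hne : ∀ y ∈ l, y.1 ≠ x.1) :
    (pvInsort x l).Pairwise pvKeyLtP := by
  induction l with
  | nil => exact List.pairwise_singleton _ _
  | cons y ys ih =>
    rcases List.pairwise_cons.mp hs with ⟨hy, hys⟩
    simp only [pvInsort]
    split
    · rename_i hlt
      refine List.pairwise_cons.mpr ⟨?_, ih hys (fun z hz => hne z (List.mem_cons_of_mem _ hz))⟩
      intro z hz
      rcases List.mem_cons.mp ((pvInsort_perm x ys).mem_iff.mp hz) with hzx | hz'
      · rw [hzx]; exact hlt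
      · exact hy z hz'
    · rename_i hnlt
      have hne' : y.1 ≠ x.1 := hne y List.mem_cons_self
      have hxy : pvLexLt x.1 y.1 = true := by
        rcases pvLexLt_total hne' with h | h
        · exact absurd h hnlt
        · exact h
      refine List.pairwise_cons.mpr ⟨?_, hs⟩
      intro z hz
      rcases List.mem_cons.mp hz with hzy | hz'
      · rw [hzy]; exact hxy
      · exact pvLexLt_trans hxy (hy z hz')

-- ----- first-minimum characterisation of PySem.List.min? -----
theorem pvMinFold_keep {α : Type} (key : α → Int) (m : α) (t : List α)
    (h : ∀ y ∈ t, key m ≤ key y) :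
    t.foldl (fun acc x => match acc with
      | none => some x
      | some mm => if key x < key mm then some x else some mm) (some m) = some m := by
  induction t with
  | nil => rfl
  | cons y ys ih =>
    have hy := h y List.mem_cons_self
    simp only [List.foldl_cons]
    rw [if_neg (by omega)]
    exact ih (fun z hz => h z (List.mem_cons_of_mem _ hz))

theorem pvMinFold_reach {α : Type} (key : α → Int) (m : α) (post : List α)
    (hpost : ∀ y ∈ post, key m ≤ key y) :
    ∀ (pre : List α) (a : α), key m < key a → (∀ y ∈ pre, key m < key y) →
    (pre ++ m :: post).foldl (fun acc x => match acc with
      | none => some x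
      | some mm => if key x < key mm then some x else some mm) (some a) = some m := by
  intro pre
  induction pre with
  | nil =>
    intro a ha _
    simp only [List.nil_append, List.foldl_cons]
    rw [if_pos ha]
    exact pvMinFold_keep key m post hpost
  | cons y ys ih =>
    intro a ha hpre
    have hy := hpre y List.mem_cons_self
    simp only [List.cons_append, List.foldl_cons]
    by_cases hlt : key y < key a
    · rw [if_pos hlt]
      exact ih y hy (fun z hz => hpre z (List.mem_cons_of_mem _ hz))
    · rw [if_neg hlt]
      exact ih a ha (fun z hz => hpre z (List.mem_cons_of_mem _ hz))

theorem pvMin?_first {α : Type} (key : α → Int) (pre : List α) (m : α) (post : List α)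
    (hpre : ∀ y ∈ pre, key m < key y) (hpost : ∀ y ∈ post, key m ≤ key y) :
    PySem.List.min? (pre ++ m :: post) key = some m := by
  cases pre with
  | nil =>
    simp only [PySem.List.min?, List.nil_append, List.foldl_cons]
    exact pvMinFold_keep key m post hpost
  | cons y ys =>
    simp only [PySem.List.min?, List.cons_append, List.foldl_cons]
    exact pvMinFold_reach key m post hpost ys y (hpre y List.mem_cons_self)
      (fun z hz => hpre z (List.mem_cons_of_mem _ hz))

-- unpacking Nodup keys / increasing seqs over a decomposition of the index items
theorem pvDecomp {L P Q : List (String × Int × Int)} {ch : String} {cs : Int × Int}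
    (hL : L = P ++ (ch, cs) :: Q)
    (hf : (L.map (·.1)).Nodup) (hd : (L.map (fun p => p.2.2)).Pairwise (· < ·)) :
    (∀ p ∈ P, p.1 ≠ ch) ∧ (∀ p ∈ Q, p.1 ≠ ch) ∧
    (∀ p ∈ P, p.2.2 < cs.2) ∧ (∀ p ∈ Q, cs.2 < p.2.2) := by
  subst hL
  rw [List.map_append, List.map_cons] at hf hd
  rcases List.nodup_append.mp hf with ⟨hfP, hfQ, hdisj⟩
  rcases List.nodup_cons.mp hfQ with ⟨hch, _⟩
  rcases List.pairwise_append.mp hd with ⟨_, pwCons, cross⟩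
  rcases List.pairwise_cons.mp pwCons with ⟨hall, _⟩
  refine ⟨?_, ?_, ?_, ?_⟩
  · intro p hp he
    exact hdisj _ (List.mem_map_of_mem hp) _ List.mem_cons_self he
  · intro p hp he
    exact hch (List.mem_map.mpr ⟨p, hp, he⟩)
  · intro p hp
    exact cross _ (List.mem_map_of_mem hp) _ List.mem_cons_self
  · intro p hp
    exact hall _ (List.mem_map_of_mem hp)

-- preservation of the invariant by one step
theorem pvStep_inv (k : Int) (hk : 1 ≤ k) (c : Char) (d : PySem.Dict String Int)
    (st : List ((Int × Int) × String) × PySem.Dict String (Int × Int) × Int)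
    (h : pvInv d st) : pvInv (aStep k d c) (bStep k st c) := by
  obtain ⟨entries, index, seq⟩ := st
  obtain ⟨ha, hb, hc, hd, he, hf⟩ := h
  simp only at ha hb hc hd he hf
  set ch := String.ofList [c] with hch
  set L := index.items with hLdef
  -- facts shared by all branches
  have hdkeys : d.keys = L.map (·.1) := by
    simp [PySem.Dict.keys, ha, List.map_map]
  have hdnodup : d.keys.Nodup := by rw [hdkeys]; exact hf
  have hentseq : ∀ y ∈ entries, y.1.2 < seq := by
    intro y hy
    obtain ⟨p, hp, rfl⟩ := List.mem_map.mp (hb.mem_iff.mp hy)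
    exact he p hp
  cases hx : index.get? ch with
  | some cs =>
    obtain ⟨cnt, s⟩ := cs
    have hmem : (ch, (cnt, s)) ∈ L := PySem.Dict.mem_items_of_get?_eq_some index hx
    obtain ⟨P, Q, hL⟩ := List.append_of_mem hmem
    obtain ⟨hPch, hQch, hPs, hQs⟩ := pvDecomp hL hf hd
    have hgetA : d.get? ch = some cnt := by
      refine PySem.Dict.get?_of_mem_items d ?_ hdnodup
      rw [ha]; exact List.mem_map_of_mem hmem
    have hcont : d.contains ch = true := by
      rw [PySem.Dict.contains_iff_mem_keys, hdkeys]
      exact List.mem_map_of_mem hmem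
    have hcontI : index.contains ch = true := by
      rw [PySem.Dict.contains_iff_mem_keys]
      exact List.mem_map_of_mem hmem
    -- the two steps reduce
    have hA : aStep k d c = d.insert ch (cnt + 1) := by
      simp only [aStep, ← hch, hgetA]
    have hB : bStep k (entries, index, seq) c =
        (pvInsort ((cnt + 1, s), ch) (entries.filter (fun e => e.1 != (cnt, s))),
         index.insert ch (cnt + 1, s), seq) := by
      simp only [bStep, ← hch, hx]
    rw [hA, hB]
    -- items of both inserts
    have hitemsA : (d.insert ch (cnt + 1)).items =
        (P ++ (ch, (cnt + 1, s)) :: Q).map (fun p => (p.1, p.2.1)) := by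
      rw [PySem.Dict.items_insert_of_contains d _ hcont, ha, hL]
      simp only [List.map_append, List.map_cons, List.map_map]
      congr 1
      · refine List.map_congr_left ?_
        intro p hp
        simp [Function.comp, beq_iff_eq, hPch p hp]
      · congr 1
        · simp
        · refine List.map_congr_left ?_
          intro p hp
          simp [Function.comp, beq_iff_eq, hQch p hp]
    have hitemsB : (index.insert ch (cnt + 1, s)).items = P ++ (ch, (cnt + 1, s)) :: Q := by
      rw [PySem.Dict.items_insert_of_contains index _ hcontI, ← hLdef, hL]
      rw [List.map_append, List.map_cons]
      congr 1
      · refine (List.map_congr_left ?_).trans (List.map_id _)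
        intro p hp
        simp [beq_iff_eq, hPch p hp]
      · congr 1
        · simp
        · refine (List.map_congr_left ?_).trans (List.map_id _)
          intro p hp
          simp [beq_iff_eq, hQch p hp]
    -- every entry key of the old char's entry is exactly (cnt, s); others have seq ≠ s
    have hents : ∀ y ∈ entries, y.1 = (cnt, s) ∨ y.1.2 ≠ s := by
      intro y hy
      obtain ⟨p, hp, rfl⟩ := List.mem_map.mp (hb.mem_iff.mp hy)
      rw [hL] at hp
      rcases List.mem_append.mp hp with hp' | hp'
      · refine Or.inr ?_
        show p.2.2 ≠ s
        have hlt : p.2.2 < s := hPs p hp'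
        omega
      · rcases List.mem_cons.mp hp' with rfl | hp''
        · exact Or.inl rfl
        · refine Or.inr ?_
          show p.2.2 ≠ s
          have hlt : s < p.2.2 := hQs p hp''
          omega
    have hkeep : ∀ (R : List (String × Int × Int)), (∀ p ∈ R, p.2.2 ≠ s) →
        List.filter (fun e => e.1 != (cnt, s)) (R.map (fun p => (p.2, p.1))) = R.map (fun p => (p.2, p.1)) := by
      intro R hR
      rw [List.filter_eq_self]
      intro a ha'
      obtain ⟨p, hp, rfl⟩ := List.mem_map.mp ha'
      have hps := hR p hp
      show (p.2 != (cnt, s)) = true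
      rw [bne_iff_ne]
      intro heq
      exact hps (by rw [heq])
    have hfilter : (entries.filter (fun e => e.1 != (cnt, s))).Perm ((P ++ Q).map (fun p => (p.2, p.1))) := by
      refine (List.Perm.filter _ hb).trans ?_
      rw [hL, List.map_append, List.map_cons, List.filter_append, List.filter_cons]
      have hmid : ((((cnt, s), ch) : (Int × Int) × String).1 != (cnt, s)) = false := by simp
      rw [hmid]
      simp only [Bool.false_eq_true, if_false]
      rw [hkeep P (fun p hp => by have hlt : p.2.2 < s := hPs p hp; omega),
          hkeep Q (fun p hp => by have hlt : s < p.2.2 := hQs p hp; omega), ← List.map_append]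
    refine ⟨?_, ?_, ?_, ?_, ?_, ?_⟩
    · simpa only [hitemsB] using hitemsA
    · simp only [hitemsB]
      refine ((pvInsort_perm _ _).trans ?_)
      refine (hfilter.cons _).trans ?_
      simp only [List.map_append, List.map_cons]
      exact List.perm_middle.symm
    · refine pvInsort_sorted _ _ (List.Pairwise.sublist List.filter_sublist hc) ?_
      intro y hy
      have hyent := List.mem_of_mem_filter hy
      have hpred := List.of_mem_filter hy
      rcases hents y hyent with h1 | h1
      · simp [h1] at hpred
      · intro heq; rw [heq] at h1; exact h1 rfl
    · simp only [hitemsB]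
      rw [hL] at hd
      simpa using hd
    · simp only [hitemsB]
      intro p hp
      rw [hL] at he
      rcases List.mem_append.mp hp with hp' | hp'
      · exact he p (by simp [hp'])
      · rcases List.mem_cons.mp hp' with rfl | hp''
        · exact he (ch, (cnt, s)) (by simp)
        · exact he p (by simp [hp''])
    · simp only [hitemsB]
      rw [hL] at hf
      simpa using hf
  | none =>
    have hchk : ch ∉ L.map (·.1) := by
      have h1 := (PySem.Dict.get?_eq_none_iff_not_mem_keys index ch).mp hx
      simpa [PySem.Dict.keys] using h1
    have hgetA : d.get? ch = none := by
      rw [PySem.Dict.get?_eq_none_iff_not_mem_keys, hdkeys]; exact hchk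
    have hsize : d.size = L.length := by simp [PySem.Dict.size, ha]
    have hsizeI : index.size = L.length := rfl
    by_cases hksz : k ≤ (d.size : Int)
    · -- eviction branch
      have hLpos : 0 < L.length := by rw [hsize] at hksz; omega
      have hlen : entries.length = L.length := by
        rw [hb.length_eq, List.length_map]
      cases hent : entries with
      | nil => rw [hent] at hlen; simp at hlen; omega
      | cons e rest =>
      subst hent
      obtain ⟨p0, hp0, hswap⟩ := List.mem_map.mp (hb.mem_iff.mp List.mem_cons_self)
      obtain ⟨old, v0, s0⟩ := p0
      obtain ⟨P, Q, hL⟩ := List.append_of_mem hp0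
      obtain ⟨hPold, hQold, hPs, hQs⟩ := pvDecomp hL hf hd
      subst hswap
      have hrest : rest.Perm ((P ++ Q).map (fun p => (p.2, p.1))) := by
        refine List.Perm.cons_inv (hb.trans ?_)
        rw [hL]
        simp only [List.map_append, List.map_cons]
        exact List.perm_middle
      have hheads : ∀ q ∈ P ++ Q, pvLexLt (v0, s0) q.2 = true := by
        intro q hq
        have hqs : q.2.2 ≠ s0 := by
          rcases List.mem_append.mp hq with hq' | hq'
          · have hlt : q.2.2 < s0 := hPs q hq'
            omega
          · have hlt : s0 < q.2.2 := hQs q hq'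
            omega
        have hqent : (q.2, q.1) ∈ ((v0, s0), old) :: rest := by
          refine hb.mem_iff.mpr ?_
          refine List.mem_map_of_mem ?_
          rw [hL]
          rcases List.mem_append.mp hq with hq' | hq'
          · exact List.mem_append.mpr (Or.inl hq')
          · exact List.mem_append.mpr (Or.inr (List.mem_cons_of_mem _ hq'))
        have hqrest : (q.2, q.1) ∈ rest := by
          rcases List.mem_cons.mp hqent with heq | h
          · exfalso
            apply hqs
            have : q.2 = (v0, s0) := congrArg Prod.fst heq
            rw [this]
          · exact h
        exact (List.pairwise_cons.mp hc).1 _ hqrest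
      -- rephrase the invariant facts over the decomposition
      rw [hL] at he hf hchk
      have hchP : ch ∉ P.map (·.1) ∧ ch ≠ old ∧ ch ∉ Q.map (·.1) := by
        simp only [List.map_append, List.map_cons, List.mem_append, List.mem_cons, not_or] at hchk
        exact ⟨hchk.1, hchk.2.1, hchk.2.2⟩
      -- A's minimum scan returns exactly the head of B's sorted entries
      have hdkeysL : d.keys = P.map (·.1) ++ old :: Q.map (·.1) := by
        rw [hdkeys, hL]
        simp [List.map_append]
      have hvold : d.getD old 0 = v0 := by
        refine PySem.Dict.getD_of_mem_items d ?_ hdnodup 0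
        rw [ha]
        exact List.mem_map_of_mem hp0
      have hval : ∀ q ∈ P ++ Q, d.getD q.1 0 = q.2.1 := by
        intro q hq
        refine PySem.Dict.getD_of_mem_items d ?_ hdnodup 0
        rw [ha]
        refine List.mem_map_of_mem ?_
        rw [hL]
        rcases List.mem_append.mp hq with hq' | hq'
        · exact List.mem_append.mpr (Or.inl hq')
        · exact List.mem_append.mpr (Or.inr (List.mem_cons_of_mem _ hq'))
      have hlex : ∀ q ∈ P ++ Q, v0 < q.2.1 ∨ (v0 = q.2.1 ∧ s0 < q.2.2) := by
        intro q hq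
        have h1 := hheads q hq
        simp only [pvLexLt, Bool.or_eq_true, Bool.and_eq_true, decide_eq_true_eq, beq_iff_eq] at h1
        exact h1
      have hmin : PySem.List.min? d.keys (fun x => d.getD x 0) = some old := by
        rw [hdkeysL]
        refine pvMin?_first _ _ _ _ ?_ ?_
        · intro y hy
          obtain ⟨q, hq, rfl⟩ := List.mem_map.mp hy
          rw [hvold, hval q (List.mem_append.mpr (Or.inl hq))]
          have h1 := hlex q (List.mem_append.mpr (Or.inl hq))
          have h2 : q.2.2 < s0 := hPs q hq
          omega
        · intro y hy
          obtain ⟨q, hq, rfl⟩ := List.mem_map.mp hy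
          rw [hvold, hval q (List.mem_append.mpr (Or.inr hq))]
          have h1 := hlex q (List.mem_append.mpr (Or.inr hq))
          omega
      have hA : aStep k d c = (d.erase old).insert ch (v0 + 1) := by
        simp only [aStep, ← hch, hgetA, hmin, if_pos hksz, hvold]
      have hnk : ¬ (index.size : Int) < k := by
        rw [hsizeI]
        rw [hsize] at hksz
        omega
      have hB : bStep k ((((v0, s0), old) :: rest, index, seq)) c =
          (pvInsort ((v0 + 1, seq), ch) rest, (index.erase old).insert ch (v0 + 1, seq), seq + 1) := by
        simp only [bStep, ← hch, hx, if_neg hnk]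
      rw [hA, hB]
      -- items after erase + insert, on both sides
      have hitemsEA : (d.erase old).items =
          P.map (fun p => (p.1, p.2.1)) ++ Q.map (fun p => (p.1, p.2.1)) := by
        show d.items.filter (fun p => !(p.1 == old)) = _
        rw [ha, hL]
        simp only [List.map_append, List.map_cons, List.filter_append, List.filter_cons]
        have hmid : (!(((old, v0) : String × Int).1 == old)) = false := by simp
        rw [hmid]
        simp only [Bool.false_eq_true, if_false]
        rw [List.filter_eq_self.mpr (fun a ha' => by
              obtain ⟨q, hq, rfl⟩ := List.mem_map.mp ha'
              simp [hPold q hq]),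
            List.filter_eq_self.mpr (fun a ha' => by
              obtain ⟨q, hq, rfl⟩ := List.mem_map.mp ha'
              simp [hQold q hq])]
      have hitemsEB : (index.erase old).items = P ++ Q := by
        show index.items.filter (fun p => !(p.1 == old)) = _
        rw [← hLdef, hL]
        simp only [List.filter_append, List.filter_cons]
        have hmid : (!(((old, (v0, s0)) : String × Int × Int).1 == old)) = false := by simp
        rw [hmid]
        simp only [Bool.false_eq_true, if_false]
        rw [List.filter_eq_self.mpr (fun a ha' => by simp [hPold a ha']),
            List.filter_eq_self.mpr (fun a ha' => by simp [hQold a ha'])]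
      have hcontEA : (d.erase old).contains ch = false := by
        rw [Bool.eq_false_iff, ne_eq, PySem.Dict.contains_iff_mem_keys]
        simp only [PySem.Dict.keys, hitemsEA, List.map_append, List.map_map, List.mem_append]
        rintro (h1 | h1)
        · exact hchP.1 (by simpa using h1)
        · exact hchP.2.2 (by simpa using h1)
      have hcontEB : (index.erase old).contains ch = false := by
        rw [Bool.eq_false_iff, ne_eq, PySem.Dict.contains_iff_mem_keys]
        simp only [PySem.Dict.keys, hitemsEB, List.map_append, List.mem_append]
        rintro (h1 | h1)
        · exact hchP.1 (by simpa using h1)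
        · exact hchP.2.2 (by simpa using h1)
      have hitemsA : ((d.erase old).insert ch (v0 + 1)).items =
          (P.map (fun p => (p.1, p.2.1)) ++ Q.map (fun p => (p.1, p.2.1))) ++ [(ch, v0 + 1)] := by
        rw [PySem.Dict.items_insert_of_not_contains _ _ hcontEA, hitemsEA]
      have hitemsB : ((index.erase old).insert ch (v0 + 1, seq)).items =
          (P ++ Q) ++ [(ch, (v0 + 1, seq))] := by
        rw [PySem.Dict.items_insert_of_not_contains _ _ hcontEB, hitemsEB]
      have hseqPQ : ∀ p ∈ P ++ Q, p.2.2 < seq := by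
        intro p hp
        rcases List.mem_append.mp hp with hp' | hp'
        · exact he p (List.mem_append.mpr (Or.inl hp'))
        · exact he p (List.mem_append.mpr (Or.inr (List.mem_cons_of_mem _ hp')))
      have hsubPQ : (P ++ Q).Sublist (P ++ (old, (v0, s0)) :: Q) :=
        (List.sublist_cons_self _ _).append_left P
      refine ⟨?_, ?_, ?_, ?_, ?_, ?_⟩
      · rw [hitemsA, hitemsB]
        simp [List.map_append]
      · rw [hitemsB]
        simp only [List.map_append, List.map_cons, List.map_nil]
        refine (pvInsort_perm _ _).trans ?_
        refine (hrest.cons _).trans ?_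
        rw [← List.map_append]
        exact (List.perm_append_singleton _ _).symm
      · refine pvInsort_sorted _ _ (List.pairwise_cons.mp hc).2 ?_
        intro y hy
        show y.1 ≠ (v0 + 1, seq)
        intro heq
        have hlt := hentseq y (List.mem_cons_of_mem _ hy)
        rw [heq] at hlt
        simp at hlt
      · rw [hitemsB]
        simp only [List.map_append, List.map_cons, List.map_nil]
        rw [List.pairwise_append]
        refine ⟨by
          rw [← List.map_append]
          exact List.Pairwise.sublist (hsubPQ.map _) (by rw [hL] at hd; exact hd), List.pairwise_singleton _ _, ?_⟩
        intro a ha' b hb'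
        rw [← List.map_append] at ha'
        obtain ⟨p, hp, rfl⟩ := List.mem_map.mp ha'
        simp only [List.mem_singleton] at hb'
        rw [hb']
        exact hseqPQ p hp
      · rw [hitemsB]
        show ∀ p ∈ (P ++ Q) ++ [(ch, (v0 + 1, seq))], p.2.2 < seq + 1
        intro p hp
        rcases List.mem_append.mp hp with hp' | hp'
        · have := hseqPQ p hp'
          omega
        · simp only [List.mem_singleton] at hp'
          rw [hp']
          show seq < seq + 1
          omega
      · rw [hitemsB]
        simp only [List.map_append, List.map_cons, List.map_nil]
        rw [List.nodup_append]
        refine ⟨by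
          rw [← List.map_append]
          exact List.Nodup.sublist (hsubPQ.map _) hf, List.nodup_singleton _, ?_⟩
        intro a ha' b hb' heq
        simp only [List.mem_singleton] at hb'
        rw [heq, hb'] at ha'
        rw [List.mem_append] at ha'
        rcases ha' with h1 | h1
        · exact hchP.1 h1
        · exact hchP.2.2 h1
    · -- room: plain insert
      have hszB : (index.size : Int) < k := by rw [hsizeI]; rw [hsize] at hksz; omega
      have hcontA : d.contains ch = false := by
        rw [Bool.eq_false_iff, ne_eq, PySem.Dict.contains_iff_mem_keys, hdkeys]; exact hchk
      have hcontI : index.contains ch = false := by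
        rw [Bool.eq_false_iff, ne_eq, PySem.Dict.contains_iff_mem_keys]
        simpa [PySem.Dict.keys] using hchk
      have hA : aStep k d c = d.insert ch 1 := by
        simp only [aStep, ← hch, hgetA]
        rw [if_neg hksz]
      have hB : bStep k (entries, index, seq) c =
          (pvInsort ((1, seq), ch) entries, index.insert ch (1, seq), seq + 1) := by
        simp only [bStep, ← hch, hx]
        rw [if_pos hszB]
      rw [hA, hB]
      have hitemsA : (d.insert ch 1).items = L.map (fun p => (p.1, p.2.1)) ++ [(ch, 1)] := by
        rw [PySem.Dict.items_insert_of_not_contains d _ hcontA, ha]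
      have hitemsB : (index.insert ch (1, seq)).items = L ++ [(ch, (1, seq))] := by
        rw [PySem.Dict.items_insert_of_not_contains index _ hcontI]
      refine ⟨?_, ?_, ?_, ?_, ?_, ?_⟩
      · rw [hitemsA, hitemsB, List.map_append]
        rfl
      · rw [hitemsB, List.map_append]
        refine (pvInsort_perm _ _).trans ?_
        refine (hb.cons _).trans ?_
        exact (List.perm_append_singleton _ _).symm
      · refine pvInsort_sorted _ _ hc ?_
        intro y hy
        show y.1 ≠ (1, seq)
        intro heq
        have hlt := hentseq y hy
        rw [heq] at hlt
        simp at hlt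
      · rw [hitemsB, List.map_append]
        rw [List.pairwise_append]
        refine ⟨hd, List.pairwise_singleton _ _, ?_⟩
        intro a ha' b hb'
        obtain ⟨p, hp, rfl⟩ := List.mem_map.mp ha'
        simp only [List.map_cons, List.map_nil, List.mem_singleton] at hb'
        rw [hb']
        exact he p hp
      · rw [hitemsB]
        show ∀ p ∈ L ++ [(ch, (1, seq))], p.2.2 < seq + 1
        intro p hp
        rcases List.mem_append.mp hp with hp' | hp'
        · have := he p hp'
          omega
        · simp only [List.mem_singleton] at hp'
          rw [hp']
          show seq < seq + 1
          omega
      · rw [hitemsB, List.map_append]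
        rw [List.nodup_append]
        refine ⟨hf, List.nodup_singleton _, ?_⟩
        intro a ha' b hb' heq
        simp only [List.map_cons, List.map_nil, List.mem_singleton] at hb'
        rw [heq, hb'] at ha'
        exact hchk ha'

theorem pvFold_inv (k : Int) (hk : 1 ≤ k) (l : List Char) :
    ∀ (d : PySem.Dict String Int)
      (st : List ((Int × Int) × String) × PySem.Dict String (Int × Int) × Int),
    pvInv d st → pvInv (l.foldl (aStep k) d) (l.foldl (bStep k) st) := by
  induction l with
  | nil => intro d st h; exact h
  | cons c cs ih => intro d st h; exact ih _ _ (pvStep_inv k hk c d st h)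

theorem pvInv_init : pvInv PySem.Dict.empty ([], PySem.Dict.empty, 0) := by
  refine ⟨rfl, List.Perm.refl _, List.Pairwise.nil, List.Pairwise.nil, ?_, ?_⟩ <;> simp [PySem.Dict.empty]

-- ===== VERDICT (by name: the statement is the Claim_ definition above) =====
theorem space_saving_count_spec : Claim_equal_space_saving_count := by
  intro text k _ hpre
  unfold Spec_space_saving_count
  rcases hpre with rfl | hk
  · rfl
  · have h := pvFold_inv k hk text.toList PySem.Dict.empty ([], PySem.Dict.empty, 0) pvInv_init
    unfold space_saving_count space_saving_count_alt
    exact h.1
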